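-- pv_equiv track=rewrite | github.com/makarenko1/Python-projects | wave_editor/wave_editor.py | slow_down
-- ===== SOURCE A (Python) =====
-- def slow_down(melody_list):
--     """This function returns a melody_list with a new pair of elements added
--     between every two elements."""
--     edited_melody_list = []
--     for pair in range(len(melody_list)-1):
--         edited_melody_list.append(melody_list[pair])
--         edited_melody_list.append([int((melody_list[pair][0] +
--                                   melody_list[pair+1][0])/2),
--                                    int((melody_list[pair][1] +
--                                         melody_list[pair+1][1])/2)])
--     edited_melody_list.append(melody_list[len(melody_list)-1])
--     return edited_melody_list
-- ===== SOURCE B (Python) =====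
-- def slow_down(melody_list):
--     """This function returns a melody_list with a new pair of elements added
--     between every two elements.  Divide-and-conquer: split the melody in half,
--     slow down each half recursively, and join the halves with the midpoint of
--     the two boundary elements."""
--     if len(melody_list) <= 1:
--         return [melody_list[0]]
--     h = len(melody_list) // 2
--     left, right = melody_list[:h], melody_list[h:]
--     mid = [int((left[-1][0] + right[0][0]) / 2),
--            int((left[-1][1] + right[0][1]) / 2)]
--     return slow_down(left) + [mid] + slow_down(right)
-- ===== Notes on version B (the rewrite author's own statement) =====
-- stated objective: alternative
-- what changed: Replaces A's single index-driven loop over range(len-1) with a divide-and-conquer recursion: split the list in half, slow down each half recursively, and join the halves with the midpoint of the two boundary elements.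
import Mathlib
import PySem

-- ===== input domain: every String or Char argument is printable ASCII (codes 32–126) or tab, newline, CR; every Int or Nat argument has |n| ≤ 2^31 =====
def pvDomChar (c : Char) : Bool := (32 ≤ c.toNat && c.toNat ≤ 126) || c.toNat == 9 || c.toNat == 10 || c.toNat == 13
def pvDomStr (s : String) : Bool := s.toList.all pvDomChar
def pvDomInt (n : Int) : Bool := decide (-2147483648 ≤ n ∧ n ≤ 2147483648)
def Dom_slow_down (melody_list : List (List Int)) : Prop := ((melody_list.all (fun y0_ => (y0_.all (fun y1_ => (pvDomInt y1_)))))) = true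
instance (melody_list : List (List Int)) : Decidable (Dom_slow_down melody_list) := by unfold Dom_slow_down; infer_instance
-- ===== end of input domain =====

-- B replaces A's index-driven interleaving loop by a divide-and-conquer recursion (split in half,
-- recurse, join with the boundary midpoint); objective: alternative decomposition, same result.

-- ===== PORT A =====
def slow_down (melody_list : List (List Int)) : List (List Int) :=
  let edited :=
    (PySem.List.pyRange 0 (PySem.List.len melody_list - 1) 1).foldl
      (fun acc pair =>
        (acc ++ [PySem.List.pyGetD melody_list pair []]) ++
          [[PySem.Int.truncdiv
              (PySem.List.pyGetD (PySem.List.pyGetD melody_list pair []) 0 0 +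
               PySem.List.pyGetD (PySem.List.pyGetD melody_list (pair + 1) []) 0 0) 2,
            PySem.Int.truncdiv
              (PySem.List.pyGetD (PySem.List.pyGetD melody_list pair []) 1 0 +
               PySem.List.pyGetD (PySem.List.pyGetD melody_list (pair + 1) []) 1 0) 2]]) []
  edited ++ [PySem.List.pyGetD melody_list (PySem.List.len melody_list - 1) []]

-- ===== PORT B =====
-- melody_list[:h] / melody_list[h:] with 0 ≤ h ≤ len are exactly take/drop (PySem.List.slice_to_natCast /
-- slice_from_natCast); len(melody_list)//2 on a Nat length is Nat division.
def slow_down_alt (melody_list : List (List Int)) : List (List Int) :=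
  if melody_list.length ≤ 1 then
    [PySem.List.pyGetD melody_list 0 []]
  else
    let h := melody_list.length / 2
    let left := melody_list.take h
    let right := melody_list.drop h
    let mid :=
      [PySem.Int.truncdiv
          (PySem.List.pyGetD (PySem.List.pyGetD left (-1) []) 0 0 +
           PySem.List.pyGetD (PySem.List.pyGetD right 0 []) 0 0) 2,
       PySem.Int.truncdiv
          (PySem.List.pyGetD (PySem.List.pyGetD left (-1) []) 1 0 +
           PySem.List.pyGetD (PySem.List.pyGetD right 0 []) 1 0) 2]
    slow_down_alt left ++ [mid] ++ slow_down_alt right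
termination_by melody_list.length
decreasing_by
  · simp; omega
  · simp; omega

-- ===== PRECONDITION & SPEC =====
-- Pre_ excludes inputs on which Python A raises IndexError: the empty list (melody_list[-1]),
-- and, when there are at least two elements, any inner list of length < 2 (pair indexing [0]/[1]).
def Pre_slow_down (melody_list : List (List Int)) : Prop :=
  melody_list ≠ [] ∧ (melody_list.length = 1 ∨ ∀ l ∈ melody_list, 2 ≤ l.length)
instance (melody_list : List (List Int)) : Decidable (Pre_slow_down melody_list) := by
  unfold Pre_slow_down; infer_instance
def pvWitness_slow_down : List (List Int) := [[4, 300], [2, 100]]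

def Spec_slow_down (melody_list : List (List Int)) (out : List (List Int)) : Prop := out = slow_down_alt melody_list
instance (melody_list : List (List Int)) (out : List (List Int)) : Decidable (Spec_slow_down melody_list out) := by unfold Spec_slow_down; infer_instance

-- ===== CLAIM (what is proved, stated in full; the proofs are below) =====
def Claim_equal_slow_down : Prop := ∀ (melody_list : List (List Int)), Dom_slow_down melody_list → Pre_slow_down melody_list → Spec_slow_down melody_list (slow_down melody_list)

-- ===== LEMMAS AND PROOFS =====

-- the midpoint pair both programs compute from two adjacent elements
def pvMid (a b : List Int) : List Int :=
  [PySem.Int.truncdiv (PySem.List.pyGetD a 0 0 + PySem.List.pyGetD b 0 0) 2,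
   PySem.Int.truncdiv (PySem.List.pyGetD a 1 0 + PySem.List.pyGetD b 1 0) 2]

-- reference: pairwise interleave, recursing one element at a time
def pvInter : List (List Int) → List (List Int)
  | [] => []
  | [a] => [a]
  | a :: b :: t => a :: pvMid a b :: pvInter (b :: t)

-- pvInter written as A's index-driven flatMap plus the last element
lemma inter_flat (m : List (List Int)) (h : m ≠ []) :
    pvInter m =
      (List.range (m.length - 1)).flatMap
        (fun k => [m.getD k [], pvMid (m.getD k []) (m.getD (k + 1) [])]) ++
      [m.getLast h] := by
  induction m with
  | nil => exact absurd rfl h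
  | cons a t ih =>
    cases t with
    | nil => simp [pvInter]
    | cons b t' =>
      have h1 : (a :: b :: t').length - 1 = ((b :: t').length - 1) + 1 := by
        simp [List.length_cons]
      rw [h1, List.range_succ_eq_map]
      simp only [List.flatMap_cons, List.flatMap_map, List.getD_cons_succ,
        List.getD_cons_zero]
      rw [List.getLast_cons (List.cons_ne_nil b t')]
      have := ih (List.cons_ne_nil b t')
      simp only [pvInter]
      rw [this]
      simp

-- A computes pvInter on every nonempty list
lemma A_eq_inter (m : List (List Int)) (h : m ≠ []) : slow_down m = pvInter m := by
  unfold slow_down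
  simp only [PySem.List.len_eq, List.append_assoc]
  rw [PySem.List.foldl_append_eq_flatMap]
  simp only [List.nil_append]
  rw [inter_flat m h]
  congr 1
  · rw [PySem.List.pyRange_one, List.flatMap_map]
    have hlen : ((m.length : Int) - 1 - 0).toNat = m.length - 1 := by omega
    rw [hlen]
    apply List.flatMap_congr ?_
    intro k hk
    have hcast : ((k : Int) + 1) = ((k + 1 : Nat) : Int) := by push_cast; ring
    simp only [zero_add]
    rw [hcast]
    simp only [PySem.List.pyGetD_natCast]
    simp [pvMid, List.getD_eq_getElem?_getD]
  · congr 1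
    cases m with
    | nil => exact absurd rfl h
    | cons a t =>
      have h2 : ((a :: t).length : Int) - 1 = ((t.length : Nat) : Int) := by
        simp [List.length_cons]
      rw [h2, PySem.List.pyGetD_natCast]
      rw [List.getLast_eq_getElem, List.getD_eq_getElem?_getD,
        List.getElem?_eq_getElem (by simp)]
      rfl

-- pvInter splits at any cut point into the two halves joined by the boundary midpoint
lemma inter_append (xs ys : List (List Int)) (hx : xs ≠ []) (hy : ys ≠ []) :
    pvInter (xs ++ ys) =
      pvInter xs ++ [pvMid (xs.getLast hx) (ys.head hy)] ++ pvInter ys := by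
  induction xs with
  | nil => exact absurd rfl hx
  | cons a xs' ih =>
    cases xs' with
    | nil =>
      cases ys with
      | nil => exact absurd rfl hy
      | cons c ys' => simp [pvInter]
    | cons b xs'' =>
      have hx' : b :: xs'' ≠ [] := List.cons_ne_nil b xs''
      have step : (a :: b :: xs'') ++ ys = a :: b :: (xs'' ++ ys) := rfl
      rw [step]
      have step2 : pvInter (a :: b :: (xs'' ++ ys)) =
          a :: pvMid a b :: pvInter (b :: (xs'' ++ ys)) := rfl
      rw [step2]
      have := ih hx'
      rw [show b :: (xs'' ++ ys) = (b :: xs'') ++ ys from rfl, this]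
      rw [List.getLast_cons hx']
      simp [pvInter]

-- the 0-default getD of a nonempty list is its head
lemma pvGetD_zero_head {α : Type} (xs : List α) (d : α) (h : xs ≠ []) :
    xs.getD 0 d = xs.head h := by
  cases xs with
  | nil => exact absurd rfl h
  | cons c r => rfl

-- B computes pvInter on every nonempty list (recursion mirrors B's divide and conquer)
theorem B_eq_inter (m : List (List Int)) (h : m ≠ []) : slow_down_alt m = pvInter m := by
  rw [slow_down_alt]
  split_ifs with hle
  · cases m with
    | nil => exact absurd rfl h
    | cons a t =>
      cases t with
      | nil => simp [pvInter, PySem.List.pyGetD_zero_cons]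
      | cons b t' => simp [List.length_cons] at hle
  · have h2 : 2 ≤ m.length := by omega
    have hh : 1 ≤ m.length / 2 := by omega
    have hx : m.take (m.length / 2) ≠ [] := by
      intro hcon
      have hlen := congrArg List.length hcon
      rw [List.length_take] at hlen
      simp only [List.length_nil] at hlen
      omega
    have hy : m.drop (m.length / 2) ≠ [] := by
      intro hcon
      have hlen := congrArg List.length hcon
      rw [List.length_drop] at hlen
      simp only [List.length_nil] at hlen
      omega
    have hrecL := B_eq_inter (m.take (m.length / 2)) hx
    have hrecR := B_eq_inter (m.drop (m.length / 2)) hy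
    simp only [hrecL, hrecR]
    conv_rhs => rw [← List.take_append_drop (m.length / 2) m]
    rw [inter_append _ _ hx hy]
    congr 2
    rw [PySem.List.pyGetD_neg_one _ _ hx]
    have e2 : PySem.List.pyGetD (m.drop (m.length / 2)) 0 [] =
        (m.drop (m.length / 2)).head hy := by
      rw [PySem.List.pyGetD_zero, pvGetD_zero_head _ _ hy]
    rw [e2]
    simp [pvMid]
termination_by m.length
decreasing_by
  · simp; omega
  · simp; omega

-- ===== VERDICT (by name: the statement is the Claim_ definition above) =====
theorem slow_down_spec : Claim_equal_slow_down := by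
  intro m _ hpre
  unfold Spec_slow_down
  rw [A_eq_inter m hpre.1, B_eq_inter m hpre.1]
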